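-- pv_equiv track=rewrite | github.com/bxduy/PYTHON_PTIT | ICPC0106.py | convert
-- ===== SOURCE A (Python) =====
-- def convert(num, k):
--     res = 1
--     if k == 4:
--         res = 2
--     elif k == 8:
--         res = 3
--     elif k == 16:
--         res = 4
--     num = "".join(reversed(num))
--     ans = ""
--     for index in range(0, len(num), res):
--         tmp = int(num[index:index + res][::-1], 2)
--         if tmp >= 10:
--             ans += chr(ord('A') - 10 + tmp)
--         else:
--             ans += str(tmp)
--     return ans[::-1]
-- ===== SOURCE B (Python) =====
-- def convert(num, k):
--     # Simpler: take the leading short group first and walk left-to-right,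
--     # instead of A's reverse / per-chunk reverse / final reverse dance.
--     bits = {4: 2, 8: 3, 16: 4}.get(k, 1)
--     digits = "0123456789ABCDEF"
--     out = []
--     while num:
--         head = len(num) % bits or bits
--         out.append(digits[int(num[:head], 2)])
--         num = num[head:]
--     return "".join(out)
-- ===== Notes on version B (the rewrite author's own statement) =====
-- stated objective: simpler
-- what changed: B scans the string left-to-right, peeling a first short group of len(num)%bits and then full groups, indexing a digit table, instead of A's triple-reversal scheme (reverse the string, reverse each chunk before int(), reverse the assembled answer) with a chr/str branch.
-- outside the precondition, e.g. on convert('+1', 4): A returns '1', B returns '1'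
import Mathlib
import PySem

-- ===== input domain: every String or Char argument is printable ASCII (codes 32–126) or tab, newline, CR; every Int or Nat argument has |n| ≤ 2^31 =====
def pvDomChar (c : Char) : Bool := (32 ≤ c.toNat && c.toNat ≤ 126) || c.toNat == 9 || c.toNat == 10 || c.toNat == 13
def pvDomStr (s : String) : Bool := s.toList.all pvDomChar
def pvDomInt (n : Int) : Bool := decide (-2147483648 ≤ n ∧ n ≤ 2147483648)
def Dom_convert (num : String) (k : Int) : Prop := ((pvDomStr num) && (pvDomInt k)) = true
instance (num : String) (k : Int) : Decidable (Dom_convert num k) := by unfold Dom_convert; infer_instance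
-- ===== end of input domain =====

-- B replaces A's triple-reversal chunking by a single left-to-right scan taking the leading short group first; objective: simpler.


-- ===== PORT A =====
-- hand port of int(s, 2), shared by both ports (both Pythons call int(group, 2));
-- exact on nonempty strings of '0'/'1' — the Pre_ domain (Python raises elsewhere)
def pvValBin (l : List Char) : Int :=
  l.foldl (fun a c => 2 * a + (if c = '1' then 1 else 0)) 0

-- A's loop body tail: chr(ord('A') - 10 + tmp) if tmp >= 10 else str(tmp)
def pvDigitA (t : Int) : List Char :=
  if t ≥ 10 then [Char.ofNat (65 - 10 + t).toNat] else (PySem.Int.toStr t).toList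

-- A's for-loop over range(0, len(num), res); num[index:index+res][::-1] is the reversed slice
def pvLoopA (b : Int) (rev : List Char) : List Char :=
  (PySem.List.pyRange 0 rev.length b).foldl
    (fun ans index =>
      ans ++ pvDigitA (pvValBin ((PySem.List.slice rev (some index) (some (index + b))).reverse)))
    []

def convert (num : String) (k : Int) : String :=
  let res : Int := if k = 4 then 2 else if k = 8 then 3 else if k = 16 then 4 else 1
  String.ofList (pvLoopA res num.toList.reverse).reverse

-- ===== PORT B =====
def pvDigits : String := "0123456789ABCDEF"

-- B's while loop: peel the leading group of size (len % bits or bits), append its table digit.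
-- digits[tmp]: Python would raise IndexError for tmp ≥ 16, impossible under Pre_; getD '?' is never reached there.
def pvGoB (bits : Nat) (l : List Char) (out : List Char) : List Char :=
  if _h : l = [] then out
  else
    let head := if l.length % bits = 0 then bits else l.length % bits
    pvGoB bits (l.drop head)
      (out ++ [(PySem.Str.pyGet? pvDigits (pvValBin (l.take head))).getD '?'])
termination_by l.length
decreasing_by
  have hlen : 0 < l.length := List.length_pos_iff.mpr _h
  have hh : 0 < head := by
    simp only [head]
    split
    · rename_i h0
      rcases Nat.eq_zero_or_pos bits with hb | hb
      · subst hb; rw [Nat.mod_zero] at h0; omega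
      · exact hb
    · rename_i h0; exact Nat.pos_of_ne_zero h0
  simp only [List.length_drop]; omega

def convert_alt (num : String) (k : Int) : String :=
  let bits : Nat := (PySem.Dict.getD (PySem.Dict.ofList [((4:Int),(2:Int)),((8:Int),(3:Int)),((16:Int),(4:Int))]) k 1).toNat
  String.ofList (pvGoB bits num.toList [])

-- ===== PRECONDITION & SPEC =====
-- Pre_ restricts to the task's natural domain, binary digit strings: outside it int(group, 2) raises
-- ValueError on most inputs (Python's lenient int parsing accidentally accepts a few like '+1',
-- where both programs behave alike).
def Pre_convert (num : String) (k : Int) : Prop :=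
  (num.toList.all (fun c => c = '0' || c = '1')) = true
instance (num : String) (k : Int) : Decidable (Pre_convert num k) := by
  unfold Pre_convert; infer_instance

def pvWitness_convert : String × Int := ("10110", 16)

def Spec_convert (num : String) (k : Int) (out : String) : Prop := out = convert_alt num k
instance (num : String) (k : Int) (out : String) : Decidable (Spec_convert num k out) := by
  unfold Spec_convert; infer_instance

-- ===== CLAIM (what is proved, stated in full; the proofs are below) =====
def Claim_equal_convert : Prop :=
  ∀ (num : String) (k : Int), Dom_convert num k → Pre_convert num k → Spec_convert num k (convert num k)

-- ===== LEMMAS AND PROOFS =====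

-- the value of a group is a nonnegative number below 2^length (true for any characters)
lemma pvValBin_aux (l : List Char) (acc : Int) (h : 0 ≤ acc) :
    0 ≤ l.foldl (fun a c => 2 * a + (if c = '1' then 1 else 0)) acc ∧
    l.foldl (fun a c => 2 * a + (if c = '1' then 1 else 0)) acc < (acc + 1) * 2 ^ l.length := by
  induction l generalizing acc with
  | nil =>
    simp only [List.foldl_nil, List.length_nil, pow_zero, mul_one]
    exact ⟨h, by omega⟩
  | cons c l ih =>
    have hacc' : 0 ≤ 2 * acc + (if c = '1' then 1 else 0) := by split <;> omega
    obtain ⟨ih1, ih2⟩ := ih (2 * acc + (if c = '1' then 1 else 0)) hacc'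
    refine ⟨by simpa using ih1, ?_⟩
    have hpow : (0:Int) < 2 ^ l.length := by positivity
    have hstep : (2 * acc + (if c = '1' then 1 else 0) + 1) * 2 ^ l.length
        ≤ (acc + 1) * 2 ^ (c :: l).length := by
      simp only [List.length_cons, pow_succ]
      have : 2 * acc + (if c = '1' then 1 else 0) + 1 ≤ (acc + 1) * 2 := by split <;> omega
      nlinarith
    simp only [List.foldl_cons]
    exact lt_of_lt_of_le ih2 hstep

lemma pvValBin_bound (l : List Char) (h4 : l.length ≤ 4) :
    0 ≤ pvValBin l ∧ pvValBin l < 16 := by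
  obtain ⟨h1, h2⟩ := pvValBin_aux l 0 le_rfl
  refine ⟨h1, lt_of_lt_of_le h2 ?_⟩
  have : (2:Int) ^ l.length ≤ 2 ^ 4 := pow_le_pow_right₀ (by norm_num) h4
  simpa using this

-- A's branch and B's table agree on digits 0..15 (and A's one-char output is its own reverse)
lemma digit_eq (t : Int) (h0 : 0 ≤ t) (h1 : t < 16) :
    (pvDigitA t).reverse = [(PySem.Str.pyGet? pvDigits t).getD '?'] := by
  interval_cases t <;> decide

-- splitting range(0, n, b) at its last element n - head
lemma range_chunk_snoc (n b : Nat) (hb : 0 < b) (hn : 0 < n) :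
    PySem.List.pyRange 0 (n : Int) (b : Int) =
      PySem.List.pyRange 0 ((n - (if n % b = 0 then b else n % b) : Nat) : Int) (b : Int)
        ++ [((n - (if n % b = 0 then b else n % b) : Nat) : Int)] := by
  set h : Nat := if n % b = 0 then b else n % b with hh
  have hq := Nat.div_add_mod n b
  have hc1 : (n + b - 1) / b = (n - h) / b + 1 := by
    by_cases h0 : n % b = 0
    · have hq1 : 0 < n / b := Nat.div_pos (Nat.le_of_dvd hn (Nat.dvd_of_mod_eq_zero h0)) hb
      have e1 : n + b - 1 = b * (n / b) + (b - 1) := by omega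
      have e2 : n - h = b * (n / b - 1) := by
        simp only [hh, if_pos h0]; rw [Nat.mul_sub, Nat.mul_one]; omega
      have d1 : (b * (n / b) + (b - 1)) / b = n / b + (b - 1) / b := Nat.mul_add_div hb _ _
      have d2 : (b - 1) / b = 0 := Nat.div_eq_of_lt (by omega)
      have d3 : b * (n / b - 1) / b = n / b - 1 := Nat.mul_div_cancel_left _ hb
      rw [e1, e2, d1, d2, d3]
      omega
    · have hr : n % b < b := Nat.mod_lt _ hb
      have e1 : n + b - 1 = b * (n / b + 1) + (n % b - 1) := by
        rw [Nat.mul_add, Nat.mul_one]; omega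
      have e2 : n - h = b * (n / b) := by simp only [hh, if_neg h0]; omega
      have d1 : (b * (n / b + 1) + (n % b - 1)) / b = n / b + 1 + (n % b - 1) / b :=
        Nat.mul_add_div hb _ _
      have d2 : (n % b - 1) / b = 0 := Nat.div_eq_of_lt (by omega)
      have d3 : b * (n / b) / b = n / b := Nat.mul_div_cancel_left _ hb
      rw [e1, e2, d1, d2, d3]
  have hmul : b * ((n - h) / b) = n - h := by
    by_cases h0 : n % b = 0
    · simp only [hh, if_pos h0]
      exact Nat.mul_div_cancel' (Nat.dvd_sub (Nat.dvd_of_mod_eq_zero h0) dvd_rfl)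
    · have e2 : n - h = b * (n / b) := by simp only [hh, if_neg h0]; omega
      rw [e2, Nat.mul_div_cancel_left _ hb]
  have hbI : (0:Int) < (b:Int) := by exact_mod_cast hb
  rw [PySem.List.pyRange_of_pos _ _ hbI, PySem.List.pyRange_of_pos _ _ hbI]
  have c1eq : (if (0:Int) < (n:Int) then (((n:Int) - 0 + b - 1) / b).toNat else 0)
      = (n - h) / b + 1 := by
    rw [if_pos (by exact_mod_cast hn)]
    have e : ((n:Int) - 0 + b - 1) = ((n + b - 1 : Nat) : Int) := by omega
    rw [e, ← Int.natCast_ediv, Int.toNat_natCast, hc1]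
  have c2eq : (if (0:Int) < ((n - h : Nat):Int) then ((((n - h : Nat):Int) - 0 + b - 1) / b).toNat else 0)
      = (n - h) / b := by
    by_cases hz : 0 < n - h
    · rw [if_pos (by exact_mod_cast hz)]
      have e : (((n - h : Nat):Int) - 0 + b - 1) = ((n - h + b - 1 : Nat) : Int) := by omega
      have e1 : n - h + b - 1 = b * ((n - h) / b) + (b - 1) := by omega
      have d1 : (b * ((n - h) / b) + (b - 1)) / b = (n - h) / b + (b - 1) / b :=
        Nat.mul_add_div hb _ _
      have d2 : (b - 1) / b = 0 := Nat.div_eq_of_lt (by omega)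
      rw [e, ← Int.natCast_ediv, Int.toNat_natCast, e1, d1, d2]
      omega
    · have hz0 : n - h = 0 := by omega
      rw [if_neg (by exact_mod_cast (by omega : ¬ (0:Int) < ((n - h : Nat):Int)))]
      rw [hz0]
      simp
  rw [c1eq, c2eq, List.range_succ, List.map_append]
  congr 1
  simp only [List.map_cons, List.map_nil]
  congr 1
  have : (b:Int) * ((n - h) / b : Nat) = ((b * ((n - h) / b) : Nat) : Int) := by push_cast; ring
  rw [zero_add, this, hmul]

-- peeling the last loop iteration of A = peeling the leading group of the input
lemma loopA_rec (b : Nat) (hb : 0 < b) (L : List Char) (hL : L ≠ []) :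
    (pvLoopA (b : Int) L.reverse).reverse =
      (pvDigitA (pvValBin (L.take (if L.length % b = 0 then b else L.length % b)))).reverse
        ++ (pvLoopA (b : Int) (L.drop (if L.length % b = 0 then b else L.length % b)).reverse).reverse := by
  set h : Nat := if L.length % b = 0 then b else L.length % b with hhdef
  set n : Nat := L.length with hndef
  have hn : 0 < n := List.length_pos_iff.mpr hL
  have hhle : 0 < h ∧ h ≤ n ∧ h ≤ b ∧ b ∣ (n - h) := by
    by_cases h0 : n % b = 0
    · have hd : b ∣ n := Nat.dvd_of_mod_eq_zero h0
      have : b ≤ n := Nat.le_of_dvd hn hd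
      refine ⟨by simp [hhdef, h0, hb], by simp [hhdef, h0, this], by simp [hhdef, h0], ?_⟩
      simp only [hhdef, if_pos h0]
      exact Nat.dvd_sub hd dvd_rfl
    · have hr : n % b < b := Nat.mod_lt _ hb
      have e2 : n - h = b * (n / b) := by
        simp only [hhdef, if_neg h0]
        have := Nat.div_add_mod n b; omega
      exact ⟨by simp [hhdef, if_neg h0]; omega, by simp [hhdef, if_neg h0]; exact Nat.mod_le _ _,
        by simp [hhdef, if_neg h0]; omega, e2 ▸ Dvd.intro _ rfl⟩
  obtain ⟨hh0, hhn, hhb, hdvd⟩ := hhle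
  -- unfold the A loop over the split range
  rw [pvLoopA, List.length_reverse, ← hndef, range_chunk_snoc n b hb hn, List.foldl_append]
  simp only [List.foldl_cons, List.foldl_nil]
  rw [← hhdef]
  -- the last chunk is the leading group of L
  have hdropRev : L.reverse.drop (n - h) = (L.take h).reverse := by
    rw [List.reverse_take, ← hndef]
  have hlast : (PySem.List.slice L.reverse (some ((n - h : Nat) : Int))
      (some (((n - h : Nat) : Int) + (b : Int)))).reverse = L.take h := by
    rw [PySem.List.slice_natCast_add, hdropRev,
      List.take_of_length_le (by simp [← hndef]; omega), List.reverse_reverse]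
  rw [hlast, List.reverse_append]
  congr 1
  -- the earlier iterations only read the reversed tail L.drop h
  have hsplit : L.reverse = (L.drop h).reverse ++ (L.take h).reverse := by
    rw [← List.reverse_append, List.take_append_drop]
  have hlen : (L.drop h).reverse.length = n - h := by simp [← hndef]
  rw [pvLoopA, hlen]
  congr 1
  apply PySem.List.foldl_congr_mem
  intro acc idx hmem
  rw [PySem.List.mem_pyRange_iff_of_pos (by exact_mod_cast hb)] at hmem
  obtain ⟨hi0, hilt, hidvd⟩ := hmem
  obtain ⟨j, rfl⟩ : ∃ j : Nat, idx = (j : Int) := ⟨idx.toNat, (Int.toNat_of_nonneg hi0).symm⟩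
  have hjlt : j < n - h := by exact_mod_cast hilt
  have hjdvd : b ∣ j := by
    have : (b : Int) ∣ (j : Int) := by simpa using hidvd
    exact_mod_cast this
  have hjb : j + b ≤ n - h := by
    have hd : b ∣ (n - h - j) := Nat.dvd_sub hdvd hjdvd
    have : b ≤ n - h - j := Nat.le_of_dvd (by omega) hd
    omega
  have hu : j ≤ (L.drop h).reverse.length := by omega
  have hslices : PySem.List.slice L.reverse (some (j : Int)) (some ((j : Int) + (b : Int)))
      = PySem.List.slice (L.drop h).reverse (some (j : Int)) (some ((j : Int) + (b : Int))) := by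
    rw [PySem.List.slice_natCast_add, PySem.List.slice_natCast_add, hsplit,
      List.drop_append_of_le_length (by omega),
      List.take_append_of_le_length (by simp [← hndef]; omega)]
  rw [hslices]

lemma goB_eq (b : Nat) (hb : 0 < b) (hb4 : b ≤ 4) (L : List Char) :
    ∀ out, pvGoB b L out = out ++ (pvLoopA (b : Int) L.reverse).reverse := by
  generalize hn : L.length = n
  induction n using Nat.strong_induction_on generalizing L with
  | _ n ih =>
    intro out
    by_cases hL : L = []
    · subst hL
      rw [pvGoB]
      simp [pvLoopA, PySem.List.pyRange]
    · rw [pvGoB, dif_neg hL]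
      have hhead4 : (if L.length % b = 0 then b else L.length % b) ≤ 4 := by
        have := Nat.mod_lt L.length hb
        split <;> omega
      have hlt : (L.drop (if L.length % b = 0 then b else L.length % b)).length < n := by
        have hpos : 0 < (if L.length % b = 0 then b else L.length % b) := by
          split
          · exact hb
          · rename_i h0; exact Nat.pos_of_ne_zero h0
        have := List.length_pos_iff.mpr hL
        simp only [List.length_drop]; omega
      rw [ih _ hlt _ rfl, loopA_rec b hb L hL]
      have h4' : (L.take (if L.length % b = 0 then b else L.length % b)).length ≤ 4 := by
        rw [List.length_take]; omega
      obtain ⟨hv0, hv16⟩ := pvValBin_bound _ h4'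
      rw [digit_eq _ hv0 hv16]
      simp [List.append_assoc]

-- ===== VERDICT (by name: the statement is the Claim_ definition above) =====
theorem convert_spec : Claim_equal_convert := by
  intro num k _hdom _hpre
  unfold Spec_convert convert convert_alt
  by_cases h4 : k = 4
  · subst h4
    norm_num
    rw [show (PySem.Dict.getD (PySem.Dict.ofList
        [((4:Int),(2:Int)),((8:Int),(3:Int)),((16:Int),(4:Int))]) 4 1).toNat = 2 from rfl]
    rw [goB_eq 2 (by norm_num) (by norm_num) num.toList []]
    norm_num
  · by_cases h8 : k = 8
    · subst h8
      norm_num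
      rw [show (PySem.Dict.getD (PySem.Dict.ofList
          [((4:Int),(2:Int)),((8:Int),(3:Int)),((16:Int),(4:Int))]) 8 1).toNat = 3 from rfl]
      rw [goB_eq 3 (by norm_num) (by norm_num) num.toList []]
      norm_num
    · by_cases h16 : k = 16
      · subst h16
        norm_num
        rw [show (PySem.Dict.getD (PySem.Dict.ofList
            [((4:Int),(2:Int)),((8:Int),(3:Int)),((16:Int),(4:Int))]) 16 1).toNat = 4 from rfl]
        rw [goB_eq 4 (by norm_num) (by norm_num) num.toList []]
        norm_num
      · have hne4 : ¬ ((4:Int) = k) := fun h => h4 h.symm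
        have hne8 : ¬ ((8:Int) = k) := fun h => h8 h.symm
        have hne16 : ¬ ((16:Int) = k) := fun h => h16 h.symm
        have hd : (PySem.Dict.getD (PySem.Dict.ofList
            [((4:Int),(2:Int)),((8:Int),(3:Int)),((16:Int),(4:Int))]) k 1).toNat = 1 := by
          have hitems : (PySem.Dict.ofList
              [((4:Int),(2:Int)),((8:Int),(3:Int)),((16:Int),(4:Int))]).items
              = [(4,2),(8,3),(16,4)] := rfl
          have b4 : ((4:Int) == k) = false := beq_eq_false_iff_ne.mpr hne4
          have b8 : ((8:Int) == k) = false := beq_eq_false_iff_ne.mpr hne8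
          have b16 : ((16:Int) == k) = false := beq_eq_false_iff_ne.mpr hne16
          simp [PySem.Dict.getD, PySem.Dict.get?, hitems, List.find?, b4, b8, b16]
        rw [hd, if_neg h4, if_neg h8, if_neg h16]
        show String.ofList (pvLoopA 1 num.toList.reverse).reverse
            = String.ofList (pvGoB 1 num.toList [])
        rw [goB_eq 1 (by norm_num) (by norm_num) num.toList []]
        norm_num
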